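-- pv_equiv track=rewrite | github.com/jacoby3210/cas-data-designer | dist/temp_script.py | sort_column_indices
-- ===== SOURCE A (Python) =====
-- def sort_column_indices(headers):
--
--   column_indices = {
--     'data': [],
--     'locales': [],
--     'json': [],
--     'refs': []
--   }
--   column_names = []
--
--   for i, header in enumerate(headers):
--     column_name, column_type = header.split(':')[0], header.split(':')[1].lower()
--     column_names.append(column_name)
--
--     if 'support' in column_type: continue
--     elif 'ltext' in column_type: column_indices['locales'].append(i)
--     elif 'json' in column_type: column_indices['json'].append(i)
--     elif 'ref' in column_type: column_indices['refs'].append(i)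
--     else: column_indices['data'].append(i)
--
--   return column_names, column_indices
-- ===== SOURCE B (Python) =====
-- RULES = (('ltext', 'locales'), ('json', 'json'), ('ref', 'refs'))
-- BUCKETS = ('data', 'locales', 'json', 'refs')
--
-- def _classify(column_type):
--   column_type = column_type.lower()
--   if 'support' in column_type:
--     return None
--   for keyword, bucket in RULES:
--     if keyword in column_type:
--       return bucket
--   return 'data'
--
-- def sort_column_indices(headers):
--   parts = [header.split(':') for header in headers]
--   column_names = [p[0] for p in parts]
--   labels = [_classify(p[1]) for p in parts]
--   column_indices = {b: [i for i, l in enumerate(labels) if l == b] for b in BUCKETS}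
--   return column_names, column_indices
-- ===== Notes on version B (the rewrite author's own statement) =====
-- stated objective: alternative
-- what changed: A's single loop mutating a four-bucket dict through an if/elif chain is replaced by a pure classification pass (an ordered keyword-rule table producing a label per header) followed by building the dict with one filtering comprehension per bucket.
import Mathlib
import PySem

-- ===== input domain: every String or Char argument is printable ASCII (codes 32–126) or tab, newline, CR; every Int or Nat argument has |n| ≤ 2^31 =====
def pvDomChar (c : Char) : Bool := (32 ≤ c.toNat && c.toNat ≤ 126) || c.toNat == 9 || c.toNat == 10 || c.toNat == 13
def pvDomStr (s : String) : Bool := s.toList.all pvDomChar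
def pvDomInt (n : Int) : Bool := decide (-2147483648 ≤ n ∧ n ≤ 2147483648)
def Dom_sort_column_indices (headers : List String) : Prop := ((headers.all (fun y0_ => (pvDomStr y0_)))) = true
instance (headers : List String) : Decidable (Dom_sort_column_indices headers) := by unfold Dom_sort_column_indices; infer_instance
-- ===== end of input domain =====

-- B replaces A's if/elif dispatch into a mutated four-bucket dict by a pure classification pass
-- (an ordered rule table) followed by building each bucket as a filter over the label list (objective: alternative).

-- ===== PORT A =====
-- loop body of A; the fallthrough branch is the case where header.split(':')[1] raises IndexError (excluded by Pre_)
def pvStepA (st : List String × PySem.Dict String (List Int)) (p : Int × String) :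
    List String × PySem.Dict String (List Int) :=
  match PySem.List.pyGet? ((PySem.Str.split? p.2 ":").getD []) 0,
        PySem.List.pyGet? ((PySem.Str.split? p.2 ":").getD []) 1 with
  | some column_name, some t0 =>
    let column_type := PySem.Str.lower t0
    let names := st.1 ++ [column_name]
    if PySem.Str.isIn "support" column_type then (names, st.2)
    else if PySem.Str.isIn "ltext" column_type then (names, st.2.modify "locales" [] (· ++ [p.1]))
    else if PySem.Str.isIn "json" column_type then (names, st.2.modify "json" [] (· ++ [p.1]))
    else if PySem.Str.isIn "ref" column_type then (names, st.2.modify "refs" [] (· ++ [p.1]))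
    else (names, st.2.modify "data" [] (· ++ [p.1]))
  | _, _ => st

def sort_column_indices (headers : List String) : List String × (List (String × List Int)) :=
  let column_indices : PySem.Dict String (List Int) :=
    PySem.Dict.mk [("data", []), ("locales", []), ("json", []), ("refs", [])]
  let r := (PySem.List.enumerate headers 0).foldl pvStepA ([], column_indices)
  (r.1, r.2.items)

-- ===== PORT B =====
def pvRules : List (String × String) := [("ltext", "locales"), ("json", "json"), ("ref", "refs")]

def pvBuckets : List String := ["data", "locales", "json", "refs"]

def pvClassify (column_type : String) : Option String :=
  let t := PySem.Str.lower column_type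
  if PySem.Str.isIn "support" t then none
  else
    match pvRules.find? (fun rule => PySem.Str.isIn rule.1 t) with
    | some rule => some rule.2
    | none => some "data"

def sort_column_indices_alt (headers : List String) : List String × (List (String × List Int)) :=
  let parts := headers.map (fun h => (PySem.Str.split? h ":").getD [])
  let column_names := parts.map (fun p => (PySem.List.pyGet? p 0).getD "")
  -- the none branch of p[1] is where Python's Source B raises IndexError (excluded by Pre_)
  let labels := parts.map (fun p =>
    match PySem.List.pyGet? p 1 with
    | some t => pvClassify t
    | none => none)
  let column_indices := pvBuckets.map (fun b =>
    (b, (PySem.List.enumerate labels 0).filterMap (fun q => if q.2 == some b then some q.1 else none)))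
  (column_names, column_indices)

-- ===== PRECONDITION & SPEC =====
-- Pre_ admits exactly the headers containing a ':' (split gives ≥ 2 pieces); on the others both
-- Pythons raise IndexError at header.split(':')[1].
def Pre_sort_column_indices (headers : List String) : Prop :=
  (headers.all (fun h => 2 ≤ ((PySem.Str.split? h ":").getD []).length)) = true
instance (headers : List String) : Decidable (Pre_sort_column_indices headers) := by
  unfold Pre_sort_column_indices; infer_instance

def pvWitness_sort_column_indices : List String :=
  ["id:data", "name:LTEXT", "price:json", "cat:Reference", "tmp:support"]

def Spec_sort_column_indices (headers : List String) (out : List String × (List (String × List Int))) : Prop := out = sort_column_indices_alt headers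
instance (headers : List String) (out : List String × (List (String × List Int))) : Decidable (Spec_sort_column_indices headers out) := by unfold Spec_sort_column_indices; infer_instance

-- ===== CLAIM (what is proved, stated in full; the proofs are below) =====
def Claim_equal_sort_column_indices : Prop := ∀ (headers : List String), Dom_sort_column_indices headers → Pre_sort_column_indices headers → Spec_sort_column_indices headers (sort_column_indices headers)

-- ===== LEMMAS AND PROOFS =====

-- the label B computes for one header (B's labels list is headers.map pvLabel)
def pvLabel (h : String) : Option String :=
  match PySem.List.pyGet? ((PySem.Str.split? h ":").getD []) 1 with
  | some t => pvClassify t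
  | none => none

-- the bucket list B computes, with an arbitrary enumeration start
def pvIdxs (hs : List String) (s : Int) (b : String) : List Int :=
  (PySem.List.enumerate (hs.map pvLabel) s).filterMap (fun q => if q.2 == some b then some q.1 else none)

lemma pvIdxs_cons (h : String) (t : List String) (s : Int) (b : String) :
    pvIdxs (h :: t) s b = (if pvLabel h = some b then [s] else []) ++ pvIdxs t (s + 1) b := by
  simp only [pvIdxs, List.map_cons, PySem.List.enumerate_cons, List.filterMap_cons]
  by_cases hb : pvLabel h = some b
  · simp [hb]
  · simp [hb]

lemma pvClassify_cases (ty : String) :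
    pvClassify ty =
      if PySem.Str.isIn "support" (PySem.Str.lower ty) then none
      else if PySem.Str.isIn "ltext" (PySem.Str.lower ty) then some "locales"
      else if PySem.Str.isIn "json" (PySem.Str.lower ty) then some "json"
      else if PySem.Str.isIn "ref" (PySem.Str.lower ty) then some "refs"
      else some "data" := by
  rw [pvClassify]
  simp only [pvRules, List.find?]
  cases hs : PySem.Str.isIn "support" (PySem.Str.lower ty) <;>
    cases hl : PySem.Str.isIn "ltext" (PySem.Str.lower ty) <;>
      cases hj : PySem.Str.isIn "json" (PySem.Str.lower ty) <;>
        cases hr : PySem.Str.isIn "ref" (PySem.Str.lower ty) <;>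
          simp [*]

lemma pvLoop (hs : List String)
    (hpre : ∀ h ∈ hs, 2 ≤ ((PySem.Str.split? h ":").getD []).length)
    (s : Int) (names : List String) (a b c r : List Int) :
    (PySem.List.enumerate hs s).foldl pvStepA
      (names, PySem.Dict.mk [("data", a), ("locales", b), ("json", c), ("refs", r)]) =
    (names ++ hs.map (fun h => (PySem.List.pyGet? ((PySem.Str.split? h ":").getD []) 0).getD ""),
     PySem.Dict.mk [("data", a ++ pvIdxs hs s "data"), ("locales", b ++ pvIdxs hs s "locales"),
                    ("json", c ++ pvIdxs hs s "json"), ("refs", r ++ pvIdxs hs s "refs")]) := by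
  induction hs generalizing s names a b c r with
  | nil => simp [pvIdxs]
  | cons h t ih =>
    have hh : 2 ≤ ((PySem.Str.split? h ":").getD []).length := hpre h (by simp)
    have h0 : PySem.List.pyGet? ((PySem.Str.split? h ":").getD []) 0 =
        some (((PySem.Str.split? h ":").getD [])[0]'(by omega)) := by
      simpa using PySem.List.pyGet?_ofNat ((PySem.Str.split? h ":").getD []) 0 (by omega)
    have h1 : PySem.List.pyGet? ((PySem.Str.split? h ":").getD []) 1 =
        some (((PySem.Str.split? h ":").getD [])[1]'(by omega)) := by
      simpa using PySem.List.pyGet?_ofNat ((PySem.Str.split? h ":").getD []) 1 (by omega)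
    have hpre' : ∀ x ∈ t, 2 ≤ ((PySem.Str.split? x ":").getD []).length :=
      fun x hx => hpre x (by simp [hx])
    have hlabel : pvLabel h = pvClassify (((PySem.Str.split? h ":").getD [])[1]'(by omega)) := by
      rw [pvLabel, h1]
    have hstep : pvStepA (names, PySem.Dict.mk [("data", a), ("locales", b), ("json", c), ("refs", r)]) (s, h) =
        (let column_type := PySem.Str.lower (((PySem.Str.split? h ":").getD [])[1]'(by omega))
         let names' := names ++ [((PySem.Str.split? h ":").getD [])[0]'(by omega)]
         let d := PySem.Dict.mk [("data", a), ("locales", b), ("json", c), ("refs", r)]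
         if PySem.Str.isIn "support" column_type then (names', d)
         else if PySem.Str.isIn "ltext" column_type then (names', d.modify "locales" [] (· ++ [s]))
         else if PySem.Str.isIn "json" column_type then (names', d.modify "json" [] (· ++ [s]))
         else if PySem.Str.isIn "ref" column_type then (names', d.modify "refs" [] (· ++ [s]))
         else (names', d.modify "data" [] (· ++ [s]))) := by
      unfold pvStepA
      rw [h0, h1]
    rw [PySem.List.enumerate_cons, List.foldl_cons, hstep]
    dsimp only
    have hcl := pvClassify_cases (((PySem.Str.split? h ":").getD [])[1]'(by omega))
    split_ifs with hsup hlt hjs hrf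
    · -- support: skip
      rw [ih hpre']
      have hlb : pvLabel h = none := by rw [hlabel, hcl, if_pos hsup]
      simp [pvIdxs_cons, hlb, h0]
    · -- ltext
      have hd : (PySem.Dict.mk [("data", a), ("locales", b), ("json", c), ("refs", r)]).modify "locales" [] (· ++ [s]) =
          PySem.Dict.mk [("data", a), ("locales", b ++ [s]), ("json", c), ("refs", r)] := by
        simp [PySem.Dict.modify, PySem.Dict.insert, PySem.Dict.contains, PySem.Dict.getD, PySem.Dict.get?]
      rw [hd, ih hpre']
      have hlb : pvLabel h = some "locales" := by rw [hlabel, hcl, if_neg hsup, if_pos hlt]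
      simp [pvIdxs_cons, hlb, h0]
    · -- json
      have hd : (PySem.Dict.mk [("data", a), ("locales", b), ("json", c), ("refs", r)]).modify "json" [] (· ++ [s]) =
          PySem.Dict.mk [("data", a), ("locales", b), ("json", c ++ [s]), ("refs", r)] := by
        simp [PySem.Dict.modify, PySem.Dict.insert, PySem.Dict.contains, PySem.Dict.getD, PySem.Dict.get?]
      rw [hd, ih hpre']
      have hlb : pvLabel h = some "json" := by rw [hlabel, hcl, if_neg hsup, if_neg hlt, if_pos hjs]
      simp [pvIdxs_cons, hlb, h0]
    · -- ref
      have hd : (PySem.Dict.mk [("data", a), ("locales", b), ("json", c), ("refs", r)]).modify "refs" [] (· ++ [s]) =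
          PySem.Dict.mk [("data", a), ("locales", b), ("json", c), ("refs", r ++ [s])] := by
        simp [PySem.Dict.modify, PySem.Dict.insert, PySem.Dict.contains, PySem.Dict.getD, PySem.Dict.get?]
      rw [hd, ih hpre']
      have hlb : pvLabel h = some "refs" := by rw [hlabel, hcl, if_neg hsup, if_neg hlt, if_neg hjs, if_pos hrf]
      simp [pvIdxs_cons, hlb, h0]
    · -- data
      have hd : (PySem.Dict.mk [("data", a), ("locales", b), ("json", c), ("refs", r)]).modify "data" [] (· ++ [s]) =
          PySem.Dict.mk [("data", a ++ [s]), ("locales", b), ("json", c), ("refs", r)] := by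
        simp [PySem.Dict.modify, PySem.Dict.insert, PySem.Dict.contains, PySem.Dict.getD, PySem.Dict.get?]
      rw [hd, ih hpre']
      have hlb : pvLabel h = some "data" := by rw [hlabel, hcl, if_neg hsup, if_neg hlt, if_neg hjs, if_neg hrf]
      simp [pvIdxs_cons, hlb, h0]

-- ===== VERDICT (by name: the statement is the Claim_ definition above) =====
theorem sort_column_indices_spec : Claim_equal_sort_column_indices := by
  unfold Claim_equal_sort_column_indices
  intro headers _ hpre
  unfold Spec_sort_column_indices
  have hpre' : ∀ h ∈ headers, 2 ≤ ((PySem.Str.split? h ":").getD []).length := by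
    intro h hh
    simpa using (List.all_eq_true.mp hpre) h hh
  show sort_column_indices headers = sort_column_indices_alt headers
  simp only [sort_column_indices, sort_column_indices_alt]
  rw [pvLoop headers hpre' 0 [] [] [] [] []]
  simp [pvBuckets, pvIdxs, List.map_map, Function.comp]
  exact ⟨rfl, rfl, rfl, rfl⟩
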